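-- pv_equiv track=rewrite | github.com/forxxin/kg_calc | kt.py | all_rotations
-- ===== SOURCE A (Python) =====
-- def rotate(shape):
--     return [list(row) for row in zip(*shape[::-1])]
--
-- def normalize_shape(shape):
--     while shape and all(c==0 for c in shape[0]):
--         shape = shape[1:]
--     while shape and all(c==0 for c in shape[-1]):
--         shape = shape[:-1]
--     while shape and all(r[0]==0 for r in shape):
--         shape = [r[1:] for r in shape]
--     while shape and all(r[-1]==0 for r in shape):
--         shape = [r[:-1] for r in shape]
--     return shape
--
-- def all_rotations(shape):
--     rots=[]
--     for _ in range(4):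
--         shape = rotate(shape)
--         shape = normalize_shape(shape)
--         if shape not in rots:
--             rots.append(shape)
--     return rots
-- ===== SOURCE B (Python) =====
-- def rotate(shape):
--     return [list(row) for row in zip(*shape[::-1])]
--
-- def normalize_shape(shape):
--     rows = [i for i, row in enumerate(shape) if any(c != 0 for c in row)]
--     if not rows:
--         return []
--     cols = [j for row in shape for j, c in enumerate(row) if c != 0]
--     cmin, cmax = min(cols), max(cols)
--     return [row[cmin:cmax + 1] for row in shape[rows[0]:rows[-1] + 1]]
--
-- def all_rotations(shape):
--     rots = []
--     for _ in range(4):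
--         shape = rotate(shape)
--         shape = normalize_shape(shape)
--         if shape not in rots:
--             rots.append(shape)
--     return rots
-- ===== Notes on version B (the rewrite author's own statement) =====
-- stated objective: simpler
-- what changed: normalize_shape's four repeated border-trimming while-loops are replaced by one scan that collects the nonzero row/column index ranges (the bounding box) followed by a single slice; the rotation loop and rotate are unchanged.
import Mathlib
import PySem

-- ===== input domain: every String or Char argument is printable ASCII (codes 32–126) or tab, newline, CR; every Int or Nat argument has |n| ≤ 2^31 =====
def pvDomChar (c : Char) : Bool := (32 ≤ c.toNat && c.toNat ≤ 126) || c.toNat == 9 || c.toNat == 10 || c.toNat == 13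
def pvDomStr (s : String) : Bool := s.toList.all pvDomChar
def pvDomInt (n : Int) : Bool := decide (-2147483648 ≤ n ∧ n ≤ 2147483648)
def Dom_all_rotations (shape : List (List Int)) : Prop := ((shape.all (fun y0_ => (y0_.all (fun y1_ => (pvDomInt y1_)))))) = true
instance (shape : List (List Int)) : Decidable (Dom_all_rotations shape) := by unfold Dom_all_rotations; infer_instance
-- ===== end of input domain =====

-- B replaces A's four border-trimming while-loops in normalize_shape by one index scan for the
-- nonzero bounding box followed by slicing (objective: simpler decomposition; both are total).

-- ===== PORT A =====

-- shared helper, identical in Source A and Source B: rotate(shape) = [list(row) for row in zip(*shape[::-1])].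
-- zip(*rows) transposed step by step: emit the heads while every row is nonempty; fuel = length of the
-- first row, which bounds the number of iterations (each step shortens every row by one).
def zipStarF : Nat → List (List Int) → List (List Int)
  | 0, _ => []
  | n + 1, rows =>
    if !rows.isEmpty && rows.all (fun r => !r.isEmpty) then
      rows.map (fun r => r.headD 0) :: zipStarF n (rows.map List.tail)
    else []

def rotate_py (shape : List (List Int)) : List (List Int) :=
  zipStarF (shape.reverse.headD []).length shape.reverse

def zrow (r : List Int) : Bool := r.all (fun c => c == 0)

-- while shape and all(c==0 for c in shape[0]): shape = shape[1:]
def trimTop : List (List Int) → List (List Int)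
  | [] => []
  | r :: rs => if zrow r then trimTop rs else r :: rs

-- while shape and all(c==0 for c in shape[-1]): shape = shape[:-1]
def trimBot (g : List (List Int)) : List (List Int) :=
  if hg : g = [] then g
  else if zrow (g.getLast hg) then trimBot g.dropLast else g
  termination_by g.length
  decreasing_by
    have : g.length ≠ 0 := fun h => hg (List.eq_nil_of_length_eq_zero h)
    simp [List.length_dropLast]; omega

-- while shape and all(r[0]==0 for r in shape): shape = [r[1:] for r in shape]
-- (fuel = width of the first row bounds the iterations; r[0]==0 is r.headD 1 == 0 since
-- the loop only runs while every row is nonempty)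
def trimLeftF : Nat → List (List Int) → List (List Int)
  | 0, g => g
  | n + 1, g =>
    if !g.isEmpty && g.all (fun r => r.headD 1 == 0) then trimLeftF n (g.map List.tail) else g

-- while shape and all(r[-1]==0 for r in shape): shape = [r[:-1] for r in shape]
def trimRightF : Nat → List (List Int) → List (List Int)
  | 0, g => g
  | n + 1, g =>
    if !g.isEmpty && g.all (fun r => r.getLastD 1 == 0) then trimRightF n (g.map List.dropLast) else g

def normalize_shape_a (g : List (List Int)) : List (List Int) :=
  let g1 := trimBot (trimTop g)
  let g2 := trimLeftF (g1.headD []).length g1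
  trimRightF (g2.headD []).length g2

def all_rotations (shape : List (List Int)) : List (List (List Int)) :=
  ((PySem.List.pyRange 0 4 1).foldl
    (fun st _ =>
      let s := normalize_shape_a (rotate_py st.1)
      (s, if st.2.contains s then st.2 else st.2 ++ [s]))
    (shape, ([] : List (List (List Int))))).2

-- ===== PORT B =====

-- rows = [i for i, row in enumerate(shape) if any(c != 0 for c in row)]
def nzRowIdx (g : List (List Int)) : List Int :=
  ((PySem.List.enumerate g 0).filter (fun p => p.2.any (fun c => c != 0))).map Prod.fst

-- cols = [j for row in shape for j, c in enumerate(row) if c != 0]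
def nzColIdx (g : List (List Int)) : List Int :=
  g.flatMap (fun row => ((PySem.List.enumerate row 0).filter (fun p => p.2 != 0)).map Prod.fst)

-- min/max of a nonempty list; the .getD 0 defaults are unreachable (guarded by rows ≠ []).
def normalize_shape_alt (g : List (List Int)) : List (List Int) :=
  let rows := nzRowIdx g
  if rows.isEmpty then []
  else
    let cols := nzColIdx g
    let cmin := (PySem.List.min? cols (fun j => j)).getD 0
    let cmax := (PySem.List.max? cols (fun j => j)).getD 0
    let r0 := rows.headD 0
    let r1 := (PySem.List.pyGet? rows (-1)).getD 0
    (PySem.List.slice g (some r0) (some (r1 + 1))).map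
      (fun row => PySem.List.slice row (some cmin) (some (cmax + 1)))

def all_rotations_alt (shape : List (List Int)) : List (List (List Int)) :=
  ((PySem.List.pyRange 0 4 1).foldl
    (fun st _ =>
      let s := normalize_shape_alt (rotate_py st.1)
      (s, if st.2.contains s then st.2 else st.2 ++ [s]))
    (shape, ([] : List (List (List Int))))).2

-- ===== PRECONDITION & SPEC =====
def Spec_all_rotations (shape : List (List Int)) (out : List (List (List Int))) : Prop := out = all_rotations_alt shape
instance (shape : List (List Int)) (out : List (List (List Int))) : Decidable (Spec_all_rotations shape out) := by unfold Spec_all_rotations; infer_instance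

-- ===== CLAIM (what is proved, stated in full; the proofs are below) =====
def Claim_equal_all_rotations : Prop := ∀ (shape : List (List Int)), Dom_all_rotations shape → Spec_all_rotations shape (all_rotations shape)

-- ===== LEMMAS AND PROOFS =====

-- g is rectangular of width w
def Rect (g : List (List Int)) (w : Nat) : Prop := ∀ r ∈ g, r.length = w

theorem zrow_iff (r : List Int) : zrow r = true ↔ ∀ c ∈ r, c = 0 := by
  simp [zrow]

-- every row produced by zipStarF has length rows.length
theorem zipStarF_rect (n : Nat) : ∀ rows, Rect (zipStarF n rows) rows.length := by
  induction n with
  | zero => intro rows r hr; simp [zipStarF] at hr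
  | succ n ih =>
    intro rows r hr
    simp only [zipStarF] at hr
    split at hr
    · rcases List.mem_cons.mp hr with h | h
      · simp [h]
      · have := ih (rows.map List.tail) r h
        simpa using this
    · simp at hr

theorem rotate_rect (g : List (List Int)) : Rect (rotate_py g) g.length := by
  have := zipStarF_rect (g.reverse.headD []).length g.reverse
  simpa [rotate_py] using this

-- membership in nzRowIdx
theorem mem_nzRowIdx (g : List (List Int)) (i : Int) :
    i ∈ nzRowIdx g ↔ ∃ (k : Nat) (hk : k < g.length), i = (k : Int) ∧ ∃ c ∈ g[k], c ≠ 0 := by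
  simp only [nzRowIdx, List.mem_map, List.mem_filter, PySem.List.mem_enumerate_iff]
  constructor
  · rintro ⟨⟨j, row⟩, ⟨⟨k, hk, hp⟩, hnz⟩, rfl⟩
    cases hp
    exact ⟨k, hk, by simp, by simpa using hnz⟩
  · rintro ⟨k, hk, rfl, c, hc, hcne⟩
    exact ⟨((k : Int), g[k]), ⟨⟨k, hk, by simp⟩, by simp; exact ⟨c, hc, hcne⟩⟩, rfl⟩

theorem nzRowIdx_pairwise (g : List (List Int)) : (nzRowIdx g).Pairwise (· < ·) := by
  have h := PySem.List.pairwise_lt_enumerate (xs := g) (s := 0)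
  exact (h.filter _).map _ (fun a b hab => hab)

-- membership in nzColIdx
theorem mem_nzColIdx (g : List (List Int)) (i : Int) :
    i ∈ nzColIdx g ↔ ∃ r ∈ g, ∃ (k : Nat) (hk : k < r.length), i = (k : Int) ∧ r[k] ≠ 0 := by
  simp only [nzColIdx, List.mem_flatMap, List.mem_map, List.mem_filter,
    PySem.List.mem_enumerate_iff]
  constructor
  · rintro ⟨row, hrow, ⟨j, c⟩, ⟨⟨k, hk, hp⟩, hnz⟩, rfl⟩
    cases hp
    exact ⟨row, hrow, k, hk, by simp, by simpa using hnz⟩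
  · rintro ⟨row, hrow, k, hk, rfl, hcne⟩
    exact ⟨row, hrow, ((k : Int), row[k]), ⟨⟨k, hk, by simp⟩, by simpa using hcne⟩, rfl⟩

theorem pairwise_getLast_max {l : List Int} (hp : l.Pairwise (· < ·)) (h : l ≠ []) :
    ∀ x ∈ l, x ≤ l.getLast h := by
  intro x hx
  induction l with
  | nil => exact absurd rfl h
  | cons a t ih =>
    rcases List.mem_cons.mp hx with rfl | hxt
    · cases t with
      | nil => simp
      | cons b t' =>
        have : ∀ y ∈ b :: t', x < y := (List.pairwise_cons.mp hp).1
        have hlast := List.getLast_mem (l := b :: t') (by simp)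
        have := this _ hlast
        rw [List.getLast_cons (by simp)]
        omega
    · cases t with
      | nil => simp at hxt
      | cons b t' =>
        rw [List.getLast_cons (by simp)]
        exact ih (List.pairwise_cons.mp hp).2 (by simp) hxt

theorem pairwise_head_min {a : Int} {t : List Int} (hp : (a :: t).Pairwise (· < ·)) :
    ∀ x ∈ a :: t, a ≤ x := by
  intro x hx
  rcases List.mem_cons.mp hx with rfl | hxt
  · omega
  · have := (List.pairwise_cons.mp hp).1 x hxt; omega

-- ROW TRIMS ---------------------------------------------------------------

theorem trimTop_all_zero (g : List (List Int)) (hz : ∀ r ∈ g, zrow r) : trimTop g = [] := by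
  induction g with
  | nil => rfl
  | cons r rs ih =>
    simp only [trimTop, hz r (by simp), if_true]
    exact ih (fun r' hr' => hz r' (by simp [hr']))

theorem trimTop_eq_drop (g : List (List Int)) (n0 : Nat) (hn : n0 < g.length)
    (hz : ∀ (k : Nat) (hk : k < n0), zrow (g[k]'(by omega)))
    (hnz : ¬ zrow (g[n0]'hn)) : trimTop g = g.drop n0 := by
  induction g generalizing n0 with
  | nil => simp at hn
  | cons r rs ih =>
    cases n0 with
    | zero =>
      simp only [List.getElem_cons_zero] at hnz
      simp [trimTop, hnz]
    | succ m =>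
      have hz0 : zrow r = true := by simpa using hz 0 (by omega)
      simp only [trimTop, hz0, if_true, List.drop_succ_cons]
      exact ih m (by simpa using hn)
        (fun k hk => by simpa using hz (k + 1) (by omega))
        (by simpa using hnz)

theorem trimBot_concat_zero (l : List (List Int)) (r : List Int) (hr : zrow r) :
    trimBot (l ++ [r]) = trimBot l := by
  rw [trimBot]
  have hne : l ++ [r] ≠ [] := by simp
  rw [dif_neg hne]
  rw [List.getLast_concat, if_pos hr, List.dropLast_concat]

theorem trimBot_concat_nonzero (l : List (List Int)) (r : List Int) (hr : ¬ zrow r) :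
    trimBot (l ++ [r]) = l ++ [r] := by
  rw [trimBot]
  have hne : l ++ [r] ≠ [] := by simp
  rw [dif_neg hne, List.getLast_concat, if_neg hr]

theorem trimBot_eq_take (g : List (List Int)) (n1 : Nat) (hn : n1 < g.length)
    (hz : ∀ (k : Nat) (hk : k < g.length), n1 < k → zrow (g[k]'hk))
    (hnz : ¬ zrow (g[n1]'hn)) : trimBot g = g.take (n1 + 1) := by
  induction g using List.reverseRecOn with
  | nil => simp at hn
  | append_singleton l r ih =>
    by_cases hlast : n1 = l.length
    · have : (l ++ [r])[n1]'hn = r := by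
        subst hlast; simp
      rw [this] at hnz
      rw [trimBot_concat_nonzero l r hnz]
      subst hlast
      rw [List.take_of_length_le (by simp)]
    · have hn1l : n1 < l.length := by
        have := hn; simp at this; omega
      have hrz : zrow r := by
        have := hz l.length (by simp) (by omega)
        simpa using this
      rw [trimBot_concat_zero l r hrz]
      rw [List.take_append_of_le_length (by omega)]
      exact ih hn1l
        (fun k hk hgt => by
          have := hz k (by simp; omega) hgt
          rwa [List.getElem_append_left hk] at this)
        (by rwa [List.getElem_append_left hn1l] at hnz)

-- COLUMN TRIMS ------------------------------------------------------------

theorem trimLeftF_eq (cmin : Nat) : ∀ (n : Nat) (m : List (List Int)) (w : Nat),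
    Rect m w → m ≠ [] → cmin < w →
    (∀ r ∈ m, ∀ (j : Nat) (hj : j < r.length), j < cmin → r[j] = 0) →
    (∃ r ∈ m, ∃ (h : cmin < r.length), r[cmin] ≠ 0) →
    cmin ≤ n → trimLeftF n m = m.map (List.drop cmin) := by
  induction cmin with
  | zero =>
    intro n m w hrect hne hcw h1 h2 hn
    have hcond : m.all (fun r => r.headD 1 == 0) = false := by
      rcases h2 with ⟨r, hr, h0, hne0⟩
      apply List.all_eq_false.mpr
      refine ⟨r, hr, ?_⟩
      cases r with
      | nil => simp at h0
      | cons c cs => simpa using hne0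
    have hid : m.map (List.drop 0) = m := by
      conv_rhs => rw [← List.map_id m]
      exact List.map_congr_left (fun r _ => List.drop_zero)
    cases n with
    | zero => exact hid.symm
    | succ n' =>
      simp only [trimLeftF, hcond, Bool.and_false, Bool.false_eq_true, if_false]
      exact hid.symm
  | succ c ih =>
    intro n m w hrect hne hcw h1 h2 hn
    have hwpos : 0 < w := by omega
    have hcond : (!m.isEmpty && m.all (fun r => r.headD 1 == 0)) = true := by
      simp only [Bool.and_eq_true, Bool.not_eq_true']
      constructor
      · simpa using hne
      · apply List.all_eq_true.mpr
        intro r hr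
        have hlen := hrect r hr
        cases r with
        | nil => simp at hlen; omega
        | cons x xs =>
          have := h1 _ hr 0 (by simp) (by omega)
          simpa using this
    cases n with
    | zero => omega
    | succ n' =>
      simp only [trimLeftF, hcond]
      rw [if_pos trivial]
      have hrect' : Rect (m.map List.tail) (w - 1) := by
        intro r hr
        rcases List.mem_map.mp hr with ⟨r', hr', rfl⟩
        simp [List.length_tail, hrect r' hr']
      have step := ih n' (m.map List.tail) (w - 1) hrect'
        (by simpa using hne) (by omega)
        (fun r hr j hj hjc => by
          rcases List.mem_map.mp hr with ⟨r', hr', rfl⟩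
          have hj' : j + 1 < r'.length := by
            have := hrect r' hr'; simp [List.length_tail, this] at hj ⊢; omega
          have := h1 r' hr' (j + 1) hj' (by omega)
          simpa [List.getElem_tail] using this)
        (by
          rcases h2 with ⟨r, hr, hlt, hne0⟩
          refine ⟨r.tail, List.mem_map.mpr ⟨r, hr, rfl⟩, ?_, ?_⟩
          · simp [List.length_tail]; omega
          · simpa [List.getElem_tail] using hne0)
        (by omega)
      rw [step, List.map_map]
      apply List.map_congr_left
      intro r _
      simp only [Function.comp_apply, List.drop_tail]

theorem trimRightF_eq (d : Nat) : ∀ (n : Nat) (m : List (List Int)) (w cmax : Nat),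
    Rect m w → m ≠ [] → cmax < w → w - (cmax + 1) = d →
    (∀ r ∈ m, ∀ (j : Nat) (hj : j < r.length), cmax < j → r[j] = 0) →
    (∃ r ∈ m, ∃ (h : cmax < r.length), r[cmax] ≠ 0) →
    d ≤ n → trimRightF n m = m.map (List.take (cmax + 1)) := by
  induction d with
  | zero =>
    intro n m w cmax hrect hne hcw hd h1 h2 hn
    have hweq : w = cmax + 1 := by omega
    have hcond : m.all (fun r => r.getLastD 1 == 0) = false := by
      rcases h2 with ⟨r, hr, h0, hne0⟩
      apply List.all_eq_false.mpr
      refine ⟨r, hr, ?_⟩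
      have hlen := hrect r hr
      have hrne : r ≠ [] := by intro h; subst h; simp at h0
      have hg : r.getLast?.getD 1 = r[cmax] := by
        rw [List.getLast?_eq_getElem?]
        have he : r.length - 1 = cmax := by omega
        rw [he, List.getElem?_eq_getElem h0]
        rfl
      simp [hg, hne0]
    have hid : m.map (List.take (cmax + 1)) = m := by
      conv_rhs => rw [← List.map_id m]
      exact List.map_congr_left
        (fun r hr => List.take_of_length_le (by rw [hrect r hr]; omega))
    cases n with
    | zero => exact hid.symm
    | succ n' =>
      simp only [trimRightF, hcond, Bool.and_false, Bool.false_eq_true, if_false]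
      exact hid.symm
  | succ d' ih =>
    intro n m w cmax hrect hne hcw hd h1 h2 hn
    have hcond : (!m.isEmpty && m.all (fun r => r.getLastD 1 == 0)) = true := by
      simp only [Bool.and_eq_true, Bool.not_eq_true']
      refine ⟨by simpa using hne, ?_⟩
      apply List.all_eq_true.mpr
      intro r hr
      have hlen := hrect r hr
      have hrne : r ≠ [] := by intro h; subst h; simp at hlen; omega
      have hpos : 0 < r.length := List.length_pos_of_ne_nil hrne
      have hgl : r.getLast?.getD 1 = r[r.length - 1]'(by omega) := by
        rw [List.getLast?_eq_getElem?]
        rw [List.getElem?_eq_getElem (by omega : r.length - 1 < r.length)]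
        rfl
      have hz0 := h1 r hr (r.length - 1) (by omega) (by omega)
      simp [hgl, hz0]
    cases n with
    | zero => omega
    | succ n' =>
      simp only [trimRightF, hcond]
      rw [if_pos trivial]
      have hrect' : Rect (m.map List.dropLast) (w - 1) := by
        intro r hr
        rcases List.mem_map.mp hr with ⟨r', hr', rfl⟩
        simp [List.length_dropLast, hrect r' hr']
      have step := ih n' (m.map List.dropLast) (w - 1) cmax hrect'
        (by simpa using hne) (by omega) (by omega)
        (fun r hr j hj hjc => by
          rcases List.mem_map.mp hr with ⟨r', hr', rfl⟩
          have hj' : j < r'.length := by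
            simp [List.length_dropLast] at hj; omega
          have := h1 r' hr' j hj' hjc
          simpa [List.getElem_dropLast] using this)
        (by
          rcases h2 with ⟨r, hr, hlt, hne0⟩
          have hlen := hrect r hr
          refine ⟨r.dropLast, List.mem_map.mpr ⟨r, hr, rfl⟩, ?_, ?_⟩
          · simp [List.length_dropLast]; omega
          · simpa [List.getElem_dropLast] using hne0)
        (by omega)
      rw [step, List.map_map]
      apply List.map_congr_left
      intro r hr
      have hlen := hrect r hr
      simp only [Function.comp_apply]
      rw [List.dropLast_eq_take, List.take_take]
      congr 1
      omega

theorem trimBot_nil : trimBot [] = [] := by rw [trimBot]; simp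

theorem trimLeftF_nil (n : Nat) : trimLeftF n [] = [] := by cases n <;> simp [trimLeftF]

theorem trimRightF_nil (n : Nat) : trimRightF n [] = [] := by cases n <;> simp [trimRightF]

theorem not_zrow_of_ex {r : List Int} (h : ∃ c ∈ r, c ≠ 0) : ¬ zrow r := by
  intro hz
  rcases h with ⟨c, hc, hne⟩
  exact hne ((zrow_iff r).mp hz c hc)

theorem ex_of_not_zrow {r : List Int} (h : ¬ zrow r) : ∃ c ∈ r, c ≠ 0 := by
  by_contra hno
  push Not at hno
  exact h ((zrow_iff r).mpr hno)

-- MAIN: the two normalizations agree on rectangular grids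
theorem pv_normalize_eq (g : List (List Int)) (w : Nat) (hrect : Rect g w) :
    normalize_shape_a g = normalize_shape_alt g := by
  unfold normalize_shape_a normalize_shape_alt
  cases hrows : nzRowIdx g with
  | nil =>
    have hz : ∀ r ∈ g, zrow r := by
      intro r hr
      rcases List.mem_iff_getElem.mp hr with ⟨k, hk, rfl⟩
      by_contra h
      have hex := ex_of_not_zrow h
      have hmem := (mem_nzRowIdx g (k : Int)).mpr ⟨k, hk, rfl, hex⟩
      rw [hrows] at hmem
      simp at hmem
    simp only [List.isEmpty_nil, if_true]
    rw [trimTop_all_zero g hz, trimBot_nil, trimLeftF_nil, trimRightF_nil]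
  | cons i0 rest =>
    -- head and last of the nonzero-row index list
    have hhead : i0 ∈ nzRowIdx g := by rw [hrows]; simp
    rcases (mem_nzRowIdx g i0).mp hhead with ⟨n0, hn0, hi0, hnz0⟩
    have hlne : (i0 :: rest) ≠ [] := by simp
    have hlastmem : (i0 :: rest).getLast hlne ∈ nzRowIdx g := by
      rw [hrows]; exact List.getLast_mem hlne
    rcases (mem_nzRowIdx g _).mp hlastmem with ⟨n1, hn1, hiL, hnz1⟩
    have hpair := nzRowIdx_pairwise g
    rw [hrows] at hpair
    have hmin : ∀ x ∈ nzRowIdx g, i0 ≤ x := by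
      rw [hrows]; exact pairwise_head_min hpair
    have hmax : ∀ x ∈ nzRowIdx g, x ≤ (i0 :: rest).getLast hlne := by
      rw [hrows]; exact pairwise_getLast_max hpair hlne
    have hn01 : n0 ≤ n1 := by
      have h := hmin _ hlastmem
      have h2 : (n0 : Int) ≤ (n1 : Int) := by rw [← hi0, ← hiL]; exact h
      exact_mod_cast h2
    -- rows outside [n0, n1] are zero, g[n0] and g[n1] are nonzero
    have hz_lt : ∀ (k : Nat) (hk : k < g.length), k < n0 → zrow (g[k]'hk) := by
      intro k hk hkn
      by_contra h
      have hmem := (mem_nzRowIdx g (k : Int)).mpr ⟨k, hk, rfl, ex_of_not_zrow h⟩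
      have h := hmin _ hmem
      have h2 : (n0 : Int) ≤ (k : Int) := by rw [← hi0]; exact h
      have : n0 ≤ k := by exact_mod_cast h2
      omega
    have hz_gt : ∀ (k : Nat) (hk : k < g.length), n1 < k → zrow (g[k]'hk) := by
      intro k hk hkn
      by_contra h
      have hmem := (mem_nzRowIdx g (k : Int)).mpr ⟨k, hk, rfl, ex_of_not_zrow h⟩
      have h := hmax _ hmem
      have h2 : (k : Int) ≤ (n1 : Int) := by rw [← hiL]; exact h
      have : k ≤ n1 := by exact_mod_cast h2
      omega
    have hzr0 : ¬ zrow (g[n0]'hn0) := not_zrow_of_ex hnz0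
    have hzr1 : ¬ zrow (g[n1]'hn1) := not_zrow_of_ex hnz1
    -- the row trims give the row slice m
    have hA1 : trimTop g = g.drop n0 :=
      trimTop_eq_drop g n0 hn0 (fun k hk => hz_lt k (by omega) hk) hzr0
    have hA2 : trimBot (g.drop n0) = (g.drop n0).take (n1 - n0 + 1) := by
      apply trimBot_eq_take _ (n1 - n0) (by simp [List.length_drop]; omega)
      · intro k hk hgt
        simp only [List.getElem_drop]
        exact hz_gt (n0 + k) (by simp [List.length_drop] at hk; omega) (by omega)
      · simp only [List.getElem_drop]
        have hidx : n0 + (n1 - n0) = n1 := by omega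
        simp only [hidx]
        exact hzr1
    set m := (g.drop n0).take (n1 - n0 + 1) with hm
    have hmlen : m.length = n1 - n0 + 1 := by
      rw [hm]; simp [List.length_take, List.length_drop]; omega
    have hmne : m ≠ [] := by
      intro h; rw [h] at hmlen; simp at hmlen
    have hmsub : ∀ r ∈ m, r ∈ g := fun r hr =>
      List.mem_of_mem_drop (List.mem_of_mem_take hr)
    have hmrect : Rect m w := fun r hr => hrect r (hmsub r hr)
    have hmget : ∀ (k : Nat) (hk : k < n1 - n0 + 1), m[k]'(by omega) = g[n0 + k]'(by omega) := by
      intro k hk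
      simp [hm, List.getElem_take, List.getElem_drop]
    have hmem_m : ∀ r ∈ g, (∃ c ∈ r, c ≠ 0) → r ∈ m := by
      intro r hr hex
      rcases List.mem_iff_getElem.mp hr with ⟨t, ht, rfl⟩
      have hmem := (mem_nzRowIdx g (t : Int)).mpr ⟨t, ht, rfl, hex⟩
      have h1 := hmin _ hmem
      have h2 := hmax _ hmem
      have h1' : (n0 : Int) ≤ (t : Int) := by rw [← hi0]; exact h1
      have h2' : (t : Int) ≤ (n1 : Int) := by rw [← hiL]; exact h2
      have ht0 : n0 ≤ t := by exact_mod_cast h1'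
      have ht1 : t ≤ n1 := by exact_mod_cast h2'
      have hlt : t - n0 < n1 - n0 + 1 := by omega
      have := hmget (t - n0) hlt
      have hidx : n0 + (t - n0) = t := by omega
      simp only [hidx] at this
      rw [← this]
      exact List.getElem_mem (by omega)
    -- column extrema
    have hcolsne : nzColIdx g ≠ [] := by
      rcases hnz0 with ⟨c, hc, hcne⟩
      rcases List.mem_iff_getElem.mp hc with ⟨j, hj, rfl⟩
      exact List.ne_nil_of_mem ((mem_nzColIdx g (j : Int)).mpr
        ⟨g[n0]'hn0, List.getElem_mem hn0, j, hj, rfl, hcne⟩)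
    cases hminq : PySem.List.min? (nzColIdx g) (fun j => j) with
    | none => exact absurd ((PySem.List.min?_eq_none_iff _ _).mp hminq) hcolsne
    | some μ =>
    cases hmaxq : PySem.List.max? (nzColIdx g) (fun j => j) with
    | none => exact absurd ((PySem.List.max?_eq_none_iff _ _).mp hmaxq) hcolsne
    | some ν =>
    rcases (mem_nzColIdx g μ).mp (PySem.List.min?_mem hminq) with
      ⟨rmu, hrmu, cminN, hcminlt, hμ, hrmunz⟩
    rcases (mem_nzColIdx g ν).mp (PySem.List.max?_mem hmaxq) with
      ⟨rnu, hrnu, cmaxN, hcmaxlt, hν, hrnunz⟩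
    have hμmin := PySem.List.min?_isMin hminq
    have hνmax := PySem.List.max?_isMax hmaxq
    have hcminw : cminN < w := by rw [hrect rmu hrmu] at hcminlt; exact hcminlt
    have hcmaxw : cmaxN < w := by rw [hrect rnu hrnu] at hcmaxlt; exact hcmaxlt
    have hminmax : cminN ≤ cmaxN := by
      have := hμmin ν (PySem.List.max?_mem hmaxq)
      rw [hμ, hν] at this
      exact_mod_cast this
    -- entries left of cminN / right of cmaxN are zero in every row
    have hczl : ∀ r ∈ g, ∀ (j : Nat) (hj : j < r.length), j < cminN → r[j] = 0 := by
      intro r hr j hj hjc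
      by_contra h
      have hmem := (mem_nzColIdx g (j : Int)).mpr ⟨r, hr, j, hj, rfl, h⟩
      have := hμmin _ hmem
      rw [hμ] at this
      have : cminN ≤ j := by exact_mod_cast this
      omega
    have hczr : ∀ r ∈ g, ∀ (j : Nat) (hj : j < r.length), cmaxN < j → r[j] = 0 := by
      intro r hr j hj hjc
      by_contra h
      have hmem := (mem_nzColIdx g (j : Int)).mpr ⟨r, hr, j, hj, rfl, h⟩
      have := hνmax _ hmem
      rw [hν] at this
      have : j ≤ cmaxN := by exact_mod_cast this
      omega
    -- the witness rows lie inside m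
    have hrmum : rmu ∈ m := hmem_m rmu hrmu ⟨rmu[cminN], List.getElem_mem hcminlt, hrmunz⟩
    have hrnum : rnu ∈ m := hmem_m rnu hrnu ⟨rnu[cmaxN], List.getElem_mem hcmaxlt, hrnunz⟩
    -- column trims
    have hheadm : (m.headD []).length = w := by
      cases hm2 : m with
      | nil => exact absurd hm2 hmne
      | cons a t => exact hrect a (hmsub a (by rw [hm2]; simp))
    have hC : trimLeftF (m.headD []).length m = m.map (List.drop cminN) := by
      apply trimLeftF_eq cminN _ m w hmrect hmne hcminw
        (fun r hr j hj hjc => hczl r (hmsub r hr) j hj hjc)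
        ⟨rmu, hrmum, hcminlt, hrmunz⟩
      rw [hheadm]; omega
    set g2 := m.map (List.drop cminN) with hg2
    have hg2rect : Rect g2 (w - cminN) := by
      intro r hr
      rcases List.mem_map.mp hr with ⟨r', hr', rfl⟩
      simp [List.length_drop, hmrect r' hr']
    have hg2ne : g2 ≠ [] := by simp [hg2, hmne]
    have hg2head : (g2.headD []).length = w - cminN := by
      cases hg22 : g2 with
      | nil => exact absurd hg22 hg2ne
      | cons a t => exact hg2rect a (by rw [hg22]; simp)
    have hD : trimRightF (g2.headD []).length g2 = g2.map (List.take (cmaxN - cminN + 1)) := by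
      apply trimRightF_eq (w - cminN - (cmaxN - cminN + 1)) _ g2 (w - cminN) (cmaxN - cminN)
        hg2rect hg2ne (by omega) (by omega)
      · intro r hr j hj hjc
        rcases List.mem_map.mp hr with ⟨r', hr', rfl⟩
        have hlen' := hmrect r' hr'
        have hj' : cminN + j < r'.length := by
          simp [List.length_drop] at hj; omega
        simp only [List.getElem_drop]
        exact hczr r' (hmsub r' hr') (cminN + j) hj' (by omega)
      · refine ⟨rnu.drop cminN, List.mem_map.mpr ⟨rnu, hrnum, rfl⟩, ?_, ?_⟩
        · simp [List.length_drop]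
          rw [hrect rnu hrnu]; omega
        · simp only [List.getElem_drop]
          have hidx : cminN + (cmaxN - cminN) = cmaxN := by omega
          simp only [hidx]
          exact hrnunz
      · rw [hg2head]; omega
    -- assemble both sides
    simp only [List.isEmpty_cons, Bool.false_eq_true, if_false]
    simp only [hA1, hA2, hC, hD]
    simp only [hminq, hmaxq, Option.getD_some]
    have hheadD : (i0 :: rest).headD 0 = i0 := rfl
    have hlast : (PySem.List.pyGet? (i0 :: rest) (-1)).getD 0 = (i0 :: rest).getLast hlne := by
      rw [PySem.List.pyGet?_neg_one, List.getLast?_eq_some_getLast hlne]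
      rfl
    rw [hheadD, hlast, hiL, hi0, hμ, hν]
    have hcast1 : ((n1 : Int) + 1) = ((n1 + 1 : Nat) : Int) := by push_cast; ring
    have hcast2 : ((cmaxN : Int) + 1) = ((cmaxN + 1 : Nat) : Int) := by push_cast; ring
    rw [hcast1, hcast2]
    rw [PySem.List.slice_natCast]
    have harith : n1 + 1 - n0 = n1 - n0 + 1 := by omega
    rw [harith, ← hm, List.map_map]
    apply List.map_congr_left
    intro r hr
    rw [PySem.List.slice_natCast]
    simp only [Function.comp_apply]
    congr 1
    omega

-- ===== VERDICT (by name: the statement is the Claim_ definition above) =====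
theorem all_rotations_spec : Claim_equal_all_rotations := by
  intro shape _
  show all_rotations shape = all_rotations_alt shape
  unfold all_rotations all_rotations_alt
  suffices hs : (PySem.List.pyRange 0 4 1).foldl
      (fun (st : List (List Int) × List (List (List Int))) (_ : Int) =>
        let s := normalize_shape_a (rotate_py st.1)
        (s, if st.2.contains s then st.2 else st.2 ++ [s]))
      (shape, ([] : List (List (List Int)))) =
      (PySem.List.pyRange 0 4 1).foldl
      (fun (st : List (List Int) × List (List (List Int))) (_ : Int) =>
        let s := normalize_shape_alt (rotate_py st.1)
        (s, if st.2.contains s then st.2 else st.2 ++ [s]))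
      (shape, ([] : List (List (List Int)))) by rw [hs]
  apply PySem.List.foldl_congr_mem
  intro acc x _
  have h := pv_normalize_eq (rotate_py acc.1) acc.1.length (rotate_rect acc.1)
  simp only [h]
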